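-- pv_equiv track=rewrite | github.com/chriss1525/AirBnB_clone | console.py | get_value
-- ===== SOURCE A (Python) =====
-- def get_value(args):
--     found = False
--     arr = " ".join([str(item) for item in args[3:]])
--     value = ""
--
--     for j in arr:
--         if found and j == '"':
--             found = not found
--             break
--         elif not found and j == '"':
--             found = not found
--         else:
--             value += j
--
--     return value
-- ===== SOURCE B (Python) =====
-- def get_value(args):
--     arr = " ".join(str(item) for item in args[3:])
--     return "".join(arr.split('"')[:2])
-- ===== Notes on version B (the rewrite author's own statement) =====
-- stated objective: simpler
-- what changed: Replaced the char-by-char found-flag state machine (with break) by splitting the joined tail on '"' and concatenating the first two segments.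
import Mathlib
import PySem

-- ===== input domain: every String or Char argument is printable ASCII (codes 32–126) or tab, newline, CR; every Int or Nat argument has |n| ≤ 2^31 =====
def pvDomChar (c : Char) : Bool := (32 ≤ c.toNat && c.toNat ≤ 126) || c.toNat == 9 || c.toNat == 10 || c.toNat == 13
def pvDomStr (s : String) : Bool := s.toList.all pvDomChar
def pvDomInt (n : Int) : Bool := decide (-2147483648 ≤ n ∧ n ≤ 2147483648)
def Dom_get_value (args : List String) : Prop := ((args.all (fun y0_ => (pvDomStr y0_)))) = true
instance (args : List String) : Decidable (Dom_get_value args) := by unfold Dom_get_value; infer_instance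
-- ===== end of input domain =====

-- B replaces A's char-by-char found-flag loop with split-on-'"' / take-two-segments / concatenate (objective: simpler); timing run measured B faster by a constant factor (C-level split/join vs per-char string append).

-- ===== PORT A =====
-- A's for-loop with the `found` flag and the `break`, as structural recursion over the chars
def getValueLoop : List Char → Bool → List Char → List Char
  | [], _, value => value
  | j :: rest, found, value =>
    if found && (j == '"') then value                                -- break
    else if (!found) && (j == '"') then getValueLoop rest (!found) value
    else getValueLoop rest found (value ++ [j])

def get_value (args : List String) : String :=
  let arr := PySem.Str.join " " (PySem.List.slice args (some 3) none)
  String.ofList (getValueLoop arr.toList false [])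

-- ===== PORT B =====
def get_value_alt (args : List String) : String :=
  let arr := PySem.Str.join " " (PySem.List.slice args (some 3) none)
  PySem.Str.join "" (PySem.List.slice ((PySem.Str.split? arr "\"").getD []) none (some 2))

-- ===== PRECONDITION & SPEC =====
def Spec_get_value (args : List String) (out : String) : Prop := out = get_value_alt args
instance (args : List String) (out : String) : Decidable (Spec_get_value args out) := by unfold Spec_get_value; infer_instance

-- ===== CLAIM (what is proved, stated in full; the proofs are below) =====
def Claim_equal_get_value : Prop := ∀ (args : List String), Dom_get_value args → Spec_get_value args (get_value args)

-- ===== LEMMAS AND PROOFS =====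

-- proof-side characterisation of splitting a char list on '"'
def qsplit : List Char → List (List Char)
  | [] => [[]]
  | c :: cs => if c = '"' then [] :: qsplit cs else (c :: (qsplit cs).headI) :: (qsplit cs).tail

theorem qsplit_eq_cons (L : List Char) : qsplit L = (qsplit L).headI :: (qsplit L).tail := by
  cases L with
  | nil => rfl
  | cons c cs => simp only [qsplit]; split <;> simp

theorem go_eq_qsplit : ∀ (fuel : Nat) (l cur : List Char) (acc : List (List Char)),
    l.length ≤ fuel →
    PySem.Chars.splitOn.go ['"'] fuel l cur acc
      = acc.reverse ++ ((cur.reverse ++ (qsplit l).headI) :: (qsplit l).tail) := by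
  intro fuel
  induction fuel with
  | zero =>
    intro l cur acc h
    have : l = [] := List.length_eq_zero_iff.mp (Nat.le_zero.mp h)
    subst this
    simp [PySem.Chars.splitOn.go, qsplit]
  | succ f ih =>
    intro l cur acc h
    cases l with
    | nil => simp [PySem.Chars.splitOn.go, qsplit]
    | cons c rest =>
      simp only [PySem.Chars.splitOn.go]
      by_cases hc : c = '"'
      · subst hc
        have hp : List.isPrefixOf ['"'] ('"' :: rest) = true := by
          simp [List.isPrefixOf]
        rw [if_pos hp]
        simp only [List.length_cons] at h
        simp only [List.length_singleton, List.drop_succ_cons, List.drop_zero]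
        rw [ih _ _ _ (by omega)]
        simp [qsplit, List.reverse_cons]
        exact (qsplit_eq_cons rest).symm
      · have hp : List.isPrefixOf ['"'] (c :: rest) = false := by
          simp only [List.isPrefixOf, Bool.and_true,
            beq_eq_false_iff_ne, ne_eq]
          exact fun h' => hc h'.symm
        rw [if_neg (by simp [hp])]
        simp only [List.length_cons] at h
        rw [ih _ _ _ (by omega)]
        simp [qsplit, hc, List.reverse_cons]

theorem splitOn_eq_qsplit (L : List Char) : PySem.Chars.splitOn L ['"'] = qsplit L := by
  unfold PySem.Chars.splitOn
  rw [go_eq_qsplit (L.length + 1) L [] [] (by omega)]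
  simpa using (qsplit_eq_cons L).symm

theorem join_nil_flatten (xs : List (List Char)) : PySem.Chars.join [] xs = xs.flatten := by
  induction xs with
  | nil => rfl
  | cons h t ih =>
    cases t with
    | nil => simp [PySem.Chars.join, List.intercalate, List.intersperse]
    | cons h2 t2 =>
      simp only [PySem.Chars.join, List.intercalate, List.intersperse] at *
      simp [ih]

theorem loop_true (L : List Char) : ∀ value, getValueLoop L true value = value ++ (qsplit L).headI := by
  induction L with
  | nil => intro value; simp [getValueLoop, qsplit]
  | cons c rest ih =>
    intro value
    by_cases hc : c = '"'
    · subst hc; simp [getValueLoop, qsplit]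
    · simp [getValueLoop, hc, qsplit, ih]

theorem loop_false (L : List Char) : ∀ value,
    getValueLoop L false value = value ++ (List.take 2 (qsplit L)).flatten := by
  induction L with
  | nil => intro value; simp [getValueLoop, qsplit]
  | cons c rest ih =>
    intro value
    by_cases hc : c = '"'
    · subst hc
      simp only [getValueLoop, qsplit]
      norm_num
      rw [loop_true]
      rw [qsplit_eq_cons rest]
      simp
    · simp only [getValueLoop, qsplit, if_neg hc]
      norm_num [hc]
      rw [ih]
      rw [qsplit_eq_cons rest]
      simp

-- ===== VERDICT (by name: the statement is the Claim_ definition above) =====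
set_option maxHeartbeats 1000000 in
theorem get_value_spec : Claim_equal_get_value := by
  intro args _
  unfold Spec_get_value get_value get_value_alt
  have ht : ("\"" : String).toList = ['"'] := rfl
  simp only [PySem.Str.split?, PySem.Chars.split?, ht]
  rw [if_neg (by decide)]
  simp only [Option.map_some, Option.getD_some]
  rw [splitOn_eq_qsplit]
  rw [show PySem.List.slice (List.map String.ofList (qsplit (PySem.Str.join " " (PySem.List.slice args (some 3))).toList)) none (some 2) = List.take 2 (List.map String.ofList (qsplit (PySem.Str.join " " (PySem.List.slice args (some 3))).toList)) from PySem.List.slice_to_natCast _ 2]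
  congr 1
  rw [loop_false _ []]
  simp [PySem.Str.join, join_nil_flatten, Function.comp_def]
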